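-- pv_equiv track=rewrite | github.com/github/gitignore | scripts/validate_templates.py | is_valid_glob_pattern
-- ===== SOURCE A (Python) =====
-- import fnmatch
--
-- def is_valid_glob_pattern(pattern: str) -> bool:
--     """Check if a pattern is a valid glob/gitignore pattern."""
--     clean = pattern.lstrip("!")
--     if clean.startswith("/"):
--         clean = clean[1:]
--     if clean.endswith("/"):
--         clean = clean[:-1]
--     if not clean:
--         return False
--     try:
--         # Check for unmatched brackets
--         bracket_depth = 0
--         i = 0
--         while i < len(clean):
--             ch = clean[i]
--             if ch == "\\" and i + 1 < len(clean):
--                 i += 2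
--                 continue
--             if ch == "[":
--                 bracket_depth += 1
--             elif ch == "]":
--                 if bracket_depth > 0:
--                     bracket_depth -= 1
--                 else:
--                     return False
--             i += 1
--         if bracket_depth != 0:
--             return False
--         # Test compile the pattern via fnmatch
--         fnmatch.translate(clean)
--         return True
--     except Exception:
--         return False
-- ===== SOURCE B (Python) =====
-- def is_valid_glob_pattern(pattern: str) -> bool:
--     """Check if a pattern is a valid glob/gitignore pattern."""
--     clean = pattern.lstrip("!")
--     if clean.startswith("/"):
--         clean = clean[1:]
--     if clean.endswith("/"):
--         clean = clean[:-1]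
--     if not clean:
--         return False
--     # Phase 1: keep only the significant characters, dropping each backslash
--     # together with the character it escapes (a lone trailing backslash is
--     # dropped too; it is never a bracket, so that cannot change the answer).
--     significant = []
--     it = iter(clean)
--     for ch in it:
--         if ch == "\\":
--             next(it, None)
--         else:
--             significant.append(ch)
--     # Phase 2: map to bracket deltas and judge the balance by the minimum
--     # prefix sum (never negative) and the total (zero).
--     deltas = [(c == "[") - (c == "]") for c in significant]
--     run = 0
--     lowest = 0
--     for d in deltas:
--         run += d
--         lowest = min(lowest, run)
--     return lowest >= 0 and run == 0
-- ===== Notes on version B (the rewrite author's own statement) =====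
-- stated objective: faster
-- what changed: Replaced A's single interleaved index-jumping while-loop (manual i += 2 to skip escapes, early-return bracket counting) by three staged passes: an escape-filtering pass over an iterator, a comprehension mapping each significant character to a bracket delta, and a fold that judges validity by the minimum prefix sum being nonnegative and the total being zero; the fnmatch.translate test-compile is dropped since translate never raises for a str argument, which removes the dominant per-call cost.
import Mathlib
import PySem

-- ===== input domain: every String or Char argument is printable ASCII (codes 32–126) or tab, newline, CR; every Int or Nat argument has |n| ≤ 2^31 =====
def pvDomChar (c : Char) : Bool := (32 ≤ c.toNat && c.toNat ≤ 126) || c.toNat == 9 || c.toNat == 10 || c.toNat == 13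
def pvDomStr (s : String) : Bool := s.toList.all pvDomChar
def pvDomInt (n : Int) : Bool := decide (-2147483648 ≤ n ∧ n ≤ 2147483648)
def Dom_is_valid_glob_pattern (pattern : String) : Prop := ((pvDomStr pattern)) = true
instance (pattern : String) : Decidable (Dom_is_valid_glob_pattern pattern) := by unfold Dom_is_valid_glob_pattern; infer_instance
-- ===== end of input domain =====

-- B replaces A's single index-jumping while-loop (early returns, i += 2 escape
-- skipping) by three staged passes: escape filtering, mapping to bracket
-- deltas, and a min-prefix-sum fold; the fnmatch.translate test-compile is
-- dropped since it never raises for a str argument.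

-- ===== PORT A =====
-- A's while-loop over indices, transcribed as recursion on the remaining
-- characters (i += 2 = drop two characters, i += 1 = drop one).
def pvLoopA : List Char → Int → Bool
  | [], depth => depth == 0
  | c :: rest, depth =>
    if c = '\\' ∧ rest ≠ [] then pvLoopA rest.tail depth
    else if c = '[' then pvLoopA rest (depth + 1)
    else if c = ']' then
      if depth > 0 then pvLoopA rest (depth - 1) else false
    else pvLoopA rest depth
termination_by xs _ => xs.length
decreasing_by all_goals simp [List.length_tail]

def is_valid_glob_pattern (pattern : String) : Bool :=
  -- lstrip("!"): drop leading '!' characters (exact)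
  let l0 := pattern.toList.dropWhile (· = '!')
  -- startswith "/" → clean[1:]
  let l1 := if l0.head? = some '/' then l0.tail else l0
  -- endswith "/" → clean[:-1]
  let l2 := if l1.getLast? = some '/' then l1.dropLast else l1
  if l2 = [] then false
  else pvLoopA l2 0
  -- fnmatch.translate(clean) never raises on a str, so the try/except
  -- always reaches `return True` here (ported as the loop's result).

-- ===== PORT B =====
-- Phase 1 of B: the for-loop over the iterator, where next() inside the body
-- consumes (drops) the character after each backslash.
def pvSig : List Char → List Char
  | [] => []
  | c :: rest => if c = '\\' then pvSig rest.tail else c :: pvSig rest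
termination_by l => l.length
decreasing_by all_goals simp [List.length_tail]

-- (c == "[") - (c == "]") of Source B's comprehension
def pvDelta (c : Char) : Int :=
  (if c = '[' then 1 else 0) - (if c = ']' then 1 else 0)

-- one step of Source B's run/lowest loop
def pvStep (p : Int × Int) (d : Int) : Int × Int :=
  (p.1 + d, min p.2 (p.1 + d))

def is_valid_glob_pattern_alt (pattern : String) : Bool :=
  let c0 := pattern.toList.dropWhile (· = '!')
  let c1 := if PySem.Chars.startswith c0 ['/'] then PySem.List.slice c0 (some 1) none else c0
  let c2 := if PySem.Chars.endswith c1 ['/'] then PySem.List.slice c1 none (some (-1)) else c1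
  if c2.isEmpty then false
  else
    let deltas := (pvSig c2).map pvDelta
    let p := deltas.foldl pvStep (0, 0)
    decide (0 ≤ p.2) && (p.1 == 0)

-- ===== PRECONDITION & SPEC =====
def Spec_is_valid_glob_pattern (pattern : String) (out : Bool) : Prop := out = is_valid_glob_pattern_alt pattern
instance (pattern : String) (out : Bool) : Decidable (Spec_is_valid_glob_pattern pattern out) := by unfold Spec_is_valid_glob_pattern; infer_instance

-- ===== CLAIM =====
def Claim_equal_is_valid_glob_pattern : Prop := ∀ (pattern : String), Dom_is_valid_glob_pattern pattern → Spec_is_valid_glob_pattern pattern (is_valid_glob_pattern pattern)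

-- ===== LEMMAS AND PROOFS =====

-- proof-only intermediate: the left-to-right "never go negative" check
def pvCheck : List Int → Int → Bool
  | [], d => d == 0
  | x :: ds, d => if d + x < 0 then false else pvCheck ds (d + x)

theorem pvStep_mono (ds : List Int) (r m : Int) :
    (ds.foldl pvStep (r, m)).2 ≤ m := by
  induction ds generalizing r m with
  | nil => simp
  | cons x ds ih =>
    simp only [List.foldl, pvStep]
    exact le_trans (ih _ _) (min_le_left _ _)

theorem pvCheck_eq_fold (ds : List Int) (d m : Int) (hd : 0 ≤ d) (hm : 0 ≤ m) :
    pvCheck ds d =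
      (decide (0 ≤ (ds.foldl pvStep (d, m)).2) && ((ds.foldl pvStep (d, m)).1 == 0)) := by
  induction ds generalizing d m with
  | nil =>
    simp [pvCheck]
    omega
  | cons x ds ih =>
    simp only [pvCheck, List.foldl, pvStep]
    by_cases hneg : d + x < 0
    · rw [if_pos hneg]
      have h2 : (ds.foldl pvStep (d + x, min m (d + x))).2 ≤ min m (d + x) :=
        pvStep_mono ds _ _
      have : ¬ (0 ≤ (ds.foldl pvStep (d + x, min m (d + x))).2) := by omega
      simp [this]
    · rw [if_neg hneg]
      exact ih (d + x) (min m (d + x)) (by omega) (by omega)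

theorem pvLoopA_eq_check (l : List Char) (d : Int) (hd : 0 ≤ d) :
    pvLoopA l d = pvCheck ((pvSig l).map pvDelta) d := by
  induction l, d using pvLoopA.induct with
  | case1 d => simp [pvLoopA, pvSig, pvCheck]
  | case2 c rest d h ih =>
    obtain ⟨rfl, hrest⟩ := h
    cases rest with
    | nil => exact absurd rfl hrest
    | cons c2 rest2 =>
      have hA : pvLoopA ('\\' :: c2 :: rest2) d = pvLoopA rest2 d := by
        rw [pvLoopA, if_pos ⟨rfl, by simp⟩]; rfl
      have hB : pvSig ('\\' :: c2 :: rest2) = pvSig rest2 := by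
        simp [pvSig]
      rw [hA, hB]; exact ih hd
  | case3 rest d h ih =>
    rw [pvLoopA, if_neg h, if_pos rfl]
    have hB : pvSig ('[' :: rest) = '[' :: pvSig rest := by simp [pvSig]
    rw [hB, List.map, pvCheck,
      if_neg (show ¬ d + pvDelta '[' < 0 by simp [pvDelta]; omega)]
    have : d + pvDelta '[' = d + 1 := by simp [pvDelta]
    rw [this]
    exact ih (by omega)
  | case4 rest d hgt h h2 ih =>
    rw [pvLoopA, if_neg h, if_neg h2, if_pos rfl, if_pos hgt]
    have hB : pvSig (']' :: rest) = ']' :: pvSig rest := by simp [pvSig]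
    rw [hB, List.map, pvCheck,
      if_neg (show ¬ d + pvDelta ']' < 0 by simp [pvDelta]; omega)]
    have : d + pvDelta ']' = d - 1 := by simp [pvDelta]; omega
    rw [this]
    exact ih (by omega)
  | case5 rest d hngt h h2 =>
    have hd0 : d = 0 := by omega
    subst hd0
    rw [pvLoopA, if_neg h, if_neg h2, if_pos rfl, if_neg hngt]
    have hB : pvSig (']' :: rest) = ']' :: pvSig rest := by simp [pvSig]
    rw [hB, List.map, pvCheck, if_pos (show (0:Int) + pvDelta ']' < 0 by simp [pvDelta])]
  | case6 c rest d h h2 h3 ih =>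
    rw [pvLoopA, if_neg h, if_neg h2, if_neg h3]
    by_cases hc : c = '\\'
    · subst hc
      have hrest : rest = [] := by
        by_contra hne; exact h ⟨rfl, hne⟩
      subst hrest
      simp [pvLoopA, pvSig, pvCheck]
    · have hB : pvSig (c :: rest) = c :: pvSig rest := by simp [pvSig, hc]
      rw [hB, List.map, pvCheck,
        if_neg (show ¬ d + pvDelta c < 0 by simp [pvDelta, h2, h3]; omega)]
      have : d + pvDelta c = d := by simp [pvDelta, h2, h3]
      rw [this]
      exact ih hd

theorem pvStartswith_slash (l : List Char) :
    PySem.Chars.startswith l ['/'] = (l.head? == some '/') := by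
  cases l <;> simp [PySem.Chars.startswith, List.isPrefixOf, eq_comm]

theorem pvEndswith_slash (l : List Char) :
    PySem.Chars.endswith l ['/'] = (l.getLast? == some '/') := by
  rw [Bool.eq_iff_iff, PySem.Chars.endswith_iff, beq_iff_eq]
  constructor
  · rintro ⟨u, rfl⟩
    simp [List.getLast?_append]
  · intro h
    rcases List.getLast?_eq_some_iff.mp h with ⟨ys, rfl⟩
    exact ⟨ys, rfl⟩

-- ===== VERDICT =====
theorem is_valid_glob_pattern_spec : Claim_equal_is_valid_glob_pattern := by
  intro pattern _
  simp only [Spec_is_valid_glob_pattern, is_valid_glob_pattern, is_valid_glob_pattern_alt,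
    pvStartswith_slash, pvEndswith_slash, PySem.List.slice_from_one, PySem.List.slice_to_neg_one,
    List.isEmpty_iff, beq_iff_eq]
  split_ifs with h1 h2 h3 <;> first
    | rfl
    | exact (pvLoopA_eq_check _ 0 le_rfl).trans (pvCheck_eq_fold _ 0 0 le_rfl le_rfl)
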